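-- pv_equiv track=rewrite | github.com/J-nowcow/programmers_python | 스택,큐/6_주식 가격.py | solution
-- ===== SOURCE A (Python) =====
-- def solution(prices):
--     n = len(prices)
--     answer = [0] * n
--     s = []
--     for i in range(n):
--         while s and prices[s[-1]] > prices[i]: # 입력받은 값이 더 작은 경우
--             t = s.pop() # 더 커질 때까지 스택의 마지막 값 빼서
--             answer[t] = i - t # n번째 값의 답은 지금 들어온 시간 - 원래 시간
--         s.append(i) # 스택에 현재 시간 저장
--
--     while s: # 남아있는 스택 처리해주기
--         t = s.pop() # t번째 값은 끝까지 더 작은게 안들어온거니까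
--         answer[t] = n - 1 - t # 시간 계산해서 저장해주기
--     return answer
-- ===== SOURCE B (Python) =====
-- def solution(prices):
--     # Naive nested scan: for each i, count steps until the first strictly
--     # smaller later price (inclusive); no stack needed.
--     n = len(prices)
--     answer = []
--     for i in range(n):
--         c = 0
--         for j in range(i + 1, n):
--             c += 1
--             if prices[i] > prices[j]:
--                 break
--         answer.append(c)
--     return answer
-- ===== Notes on version B (the rewrite author's own statement) =====
-- stated objective: simpler
-- what changed: Replaced the monotonic index stack (with a post-loop drain) by a direct nested scan that counts, for each index, the steps to the first strictly smaller later price.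
import Mathlib
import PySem

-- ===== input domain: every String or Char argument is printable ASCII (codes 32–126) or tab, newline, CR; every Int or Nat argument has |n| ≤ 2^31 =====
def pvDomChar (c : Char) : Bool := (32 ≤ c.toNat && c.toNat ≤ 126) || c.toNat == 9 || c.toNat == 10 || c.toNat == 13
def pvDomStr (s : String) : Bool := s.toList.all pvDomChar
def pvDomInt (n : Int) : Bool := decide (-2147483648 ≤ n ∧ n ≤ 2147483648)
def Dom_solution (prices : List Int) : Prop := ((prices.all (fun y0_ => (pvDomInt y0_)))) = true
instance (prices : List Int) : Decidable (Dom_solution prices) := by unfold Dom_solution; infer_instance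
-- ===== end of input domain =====

-- B replaces A's monotonic index stack by a direct nested scan (no speed claim: B is the simpler, quadratic version).
-- All list indexing below uses `.getD _ 0`; every index accessed is < prices.length, so this is exact for the Python.

-- ===== PORT A =====
-- the inner `while s and prices[s[-1]] > prices[i]` loop (stack top = list head)
def popLoopA (prices : List Int) (p : Int) (i : Nat) : List Int → List Nat → (List Int × List Nat)
  | ans, [] => (ans, [])
  | ans, t :: rest =>
    if prices.getD t 0 > p then popLoopA prices p i (ans.set t ((i : Int) - (t : Int))) rest
    else (ans, t :: rest)

-- one iteration of `for i in range(n)`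
def stepA (prices : List Int) (st : List Int × List Nat) (i : Nat) : List Int × List Nat :=
  let r := popLoopA prices (prices.getD i 0) i st.1 st.2
  (r.1, i :: r.2)

-- the trailing `while s` drain
def drainA (n : Nat) : List Int → List Nat → List Int
  | ans, [] => ans
  | ans, t :: rest => drainA n (ans.set t ((n : Int) - 1 - (t : Int))) rest

def solution (prices : List Int) : List Int :=
  let n := prices.length
  let r := (List.range n).foldl (stepA prices) (List.replicate n 0, [])
  drainA n r.1 r.2

-- ===== PORT B =====
-- inner `for j in range(i+1, n)` loop with its break, carrying the counter c
def innerB (p : Int) (prices : List Int) : List Nat → Int → Int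
  | [], c => c
  | j :: rest, c =>
    if p > prices.getD j 0 then c + 1 else innerB p prices rest (c + 1)

def countB (prices : List Int) (i : Nat) : Int :=
  innerB (prices.getD i 0) prices (List.range' (i + 1) (prices.length - (i + 1))) 0

def solution_alt (prices : List Int) : List Int :=
  (List.range prices.length).map (countB prices)

-- ===== PRECONDITION & SPEC =====
def Spec_solution (prices : List Int) (out : List Int) : Prop := out = solution_alt prices
instance (prices : List Int) (out : List Int) : Decidable (Spec_solution prices out) := by unfold Spec_solution; infer_instance

-- ===== CLAIM (what is proved, stated in full; the proofs are below) =====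
def Claim_equal_solution : Prop := ∀ (prices : List Int), Dom_solution prices → Spec_solution prices (solution prices)

-- ===== LEMMAS AND PROOFS =====

-- `t` has seen no strictly smaller price among indices (t, i)
def NoDrop (prices : List Int) (t i : Nat) : Prop :=
  ∀ j, t < j → j < i → ¬ (prices.getD t 0 > prices.getD j 0)

-- stack order: later-pushed (closer to head) indices are larger and have ≥ prices
def StackRel (prices : List Int) (a b : Nat) : Prop :=
  b < a ∧ prices.getD b 0 ≤ prices.getD a 0

-- loop invariant for A's main fold, after processing indices [0, i)
def InvA (prices : List Int) (i : Nat) (st : List Int × List Nat) : Prop :=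
  st.1.length = prices.length ∧
  (∀ t ∈ st.2, t < i) ∧
  List.Pairwise (StackRel prices) st.2 ∧
  (∀ t ∈ st.2, NoDrop prices t i) ∧
  (∀ t, t < i → t ∉ st.2 → st.1.getD t 0 = countB prices t)

lemma getD_set_self (l : List Int) (t : Nat) (v : Int) (h : t < l.length) :
    (l.set t v).getD t 0 = v := by
  simp [List.getD, h]

lemma getD_set_ne (l : List Int) (t u : Nat) (v : Int) (h : t ≠ u) :
    (l.set t v).getD u 0 = l.getD u 0 := by
  simp [List.getD, List.getElem?_set_ne h]

lemma innerB_no_drop (p : Int) (prices : List Int) (js : List Nat) (c : Int)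
    (h : ∀ j ∈ js, ¬ p > prices.getD j 0) :
    innerB p prices js c = c + js.length := by
  induction js generalizing c with
  | nil => simp [innerB]
  | cons j rest ih =>
    simp only [innerB]
    rw [if_neg (h j (by simp)), ih _ (fun k hk => h k (by simp [hk]))]
    simp; ring

lemma innerB_break (p : Int) (prices : List Int) (js1 : List Nat) (j : Nat) (js2 : List Nat) (c : Int)
    (h1 : ∀ k ∈ js1, ¬ p > prices.getD k 0) (h2 : p > prices.getD j 0) :
    innerB p prices (js1 ++ j :: js2) c = c + js1.length + 1 := by
  induction js1 generalizing c with
  | nil =>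
    simp only [List.nil_append, innerB]
    rw [if_pos h2]; simp
  | cons k rest ih =>
    simp only [List.cons_append, innerB]
    rw [if_neg (h1 k (by simp)), ih _ (fun u hu => h1 u (by simp [hu]))]
    simp; ring

-- countB of an index that never drops through position m (m ≤ n)
lemma countB_no_drop (prices : List Int) (t : Nat) (ht : t < prices.length)
    (h : NoDrop prices t prices.length) :
    countB prices t = (prices.length : Int) - 1 - t := by
  unfold countB
  rw [innerB_no_drop]
  · simp; omega
  · intro j hj
    have := List.mem_range'.1 hj
    exact h j (by omega) (by omega)

-- countB of an index popped at step i: no drop in (t,i), drop at i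
lemma countB_break (prices : List Int) (t i : Nat) (hti : t < i) (hin : i < prices.length)
    (hnd : NoDrop prices t i) (hdrop : prices.getD t 0 > prices.getD i 0) :
    countB prices t = (i : Int) - t := by
  unfold countB
  have hsplit : List.range' (t + 1) (prices.length - (t + 1)) =
      List.range' (t + 1) (i - (t + 1)) ++ i :: List.range' (i + 1) (prices.length - (i + 1)) := by
    have h1 : i :: List.range' (i + 1) (prices.length - (i + 1)) =
        List.range' i (prices.length - i) := by
      have : prices.length - i = (prices.length - (i + 1)) + 1 := by omega
      rw [this, List.range'_succ]
    have h2 : (t + 1) + (i - (t + 1)) = i := by omega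
    have h3 := List.range'_append_1 (s := t + 1) (m := i - (t + 1)) (n := prices.length - i)
    rw [h2] at h3
    rw [h1, show prices.length - (t + 1) = (i - (t + 1)) + (prices.length - i) from by omega]
    exact h3.symm
  rw [hsplit, innerB_break]
  · simp; omega
  · intro k hk
    have := List.mem_range'.1 hk
    exact hnd k (by omega) (by omega)
  · exact hdrop

-- full specification of the inner pop loop
lemma popLoopA_spec (prices : List Int) (i : Nat) (ans : List Int) (s : List Nat)
    (hlen : ans.length = prices.length) (hin : i < prices.length)
    (hb : ∀ t ∈ s, t < i)
    (hpw : List.Pairwise (StackRel prices) s)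
    (hnd : ∀ t ∈ s, NoDrop prices t i)
    (hans : ∀ t, t < i → t ∉ s → ans.getD t 0 = countB prices t) :
    (popLoopA prices (prices.getD i 0) i ans s).1.length = prices.length ∧
    (∀ t ∈ (popLoopA prices (prices.getD i 0) i ans s).2,
        t ∈ s ∧ ¬ (prices.getD t 0 > prices.getD i 0)) ∧
    List.Pairwise (StackRel prices) (popLoopA prices (prices.getD i 0) i ans s).2 ∧
    (∀ t ∈ (popLoopA prices (prices.getD i 0) i ans s).2, NoDrop prices t i) ∧
    (∀ t, t < i → t ∉ (popLoopA prices (prices.getD i 0) i ans s).2 →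
        (popLoopA prices (prices.getD i 0) i ans s).1.getD t 0 = countB prices t) := by
  induction s generalizing ans with
  | nil =>
    refine ⟨hlen, by simp [popLoopA], by simp [popLoopA], by simp [popLoopA], ?_⟩
    intro t ht _; exact hans t ht (by simp)
  | cons t0 rest ih =>
    by_cases hc : prices.getD t0 0 > prices.getD i 0
    · -- pop t0, set answer[t0] := i - t0, recurse
      have ht0i : t0 < i := hb t0 (by simp)
      have hcount : ((i : Int) - t0) = countB prices t0 := by
        rw [countB_break prices t0 i ht0i hin (hnd t0 (by simp)) hc]
      have hstep : popLoopA prices (prices.getD i 0) i ans (t0 :: rest) =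
          popLoopA prices (prices.getD i 0) i (ans.set t0 ((i : Int) - t0)) rest := by
        simp only [popLoopA]
        rw [if_pos hc]
      rw [hstep]
      have hans' : ∀ u, u < i → u ∉ rest →
          (ans.set t0 ((i : Int) - t0)).getD u 0 = countB prices u := by
        intro u hu hus
        by_cases he : u = t0
        · subst he
          rw [getD_set_self _ _ _ (by omega), hcount]
        · rw [getD_set_ne _ _ _ _ (Ne.symm he)]
          exact hans u hu (by simp [hus, he])
      obtain ⟨g1, g2, g3, g4, g5⟩ := ih _ (by simp [hlen]) (fun t ht => hb t (by simp [ht]))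
        hpw.of_cons (fun t ht => hnd t (by simp [ht])) hans'
      exact ⟨g1, fun t ht => ⟨List.mem_cons_of_mem _ (g2 t ht).1, (g2 t ht).2⟩, g3, g4, g5⟩
    · -- stop: current head stays, everything below it has price ≤ head's
      have hstep : popLoopA prices (prices.getD i 0) i ans (t0 :: rest) = (ans, t0 :: rest) := by
        simp only [popLoopA]
        rw [if_neg hc]
      rw [hstep]
      refine ⟨hlen, ?_, hpw, hnd, hans⟩
      intro t ht
      rcases List.mem_cons.1 ht with he | hr
      · exact ⟨by simp [he], by rw [he]; exact hc⟩
      · refine ⟨by simp [hr], ?_⟩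
        have hrel := (List.pairwise_cons.1 hpw).1 t hr
        have := hrel.2
        omega

lemma stepA_inv (prices : List Int) (i : Nat) (st : List Int × List Nat)
    (hin : i < prices.length) (hinv : InvA prices i st) :
    InvA prices (i + 1) (stepA prices st i) := by
  obtain ⟨hlen, hb, hpw, hnd, hans⟩ := hinv
  obtain ⟨h1, h2, h3, h4, h5⟩ :=
    popLoopA_spec prices i st.1 st.2 hlen hin hb hpw hnd hans
  refine ⟨h1, ?_, ?_, ?_, ?_⟩
  · intro t ht
    rcases List.mem_cons.1 ht with he | hr
    · omega
    · have := hb t (h2 t hr).1; omega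
  · refine List.pairwise_cons.2 ⟨?_, h3⟩
    intro t ht
    exact ⟨hb t (h2 t ht).1, by have := (h2 t ht).2; omega⟩
  · intro t ht j htj hji
    rcases List.mem_cons.1 ht with he | hr
    · omega
    · by_cases hj : j = i
      · subst hj; have := (h2 t hr).2; omega
      · exact h4 t hr j htj (by omega)
  · intro t ht hts
    have hti : t < i := by
      rcases Nat.lt_succ_iff_lt_or_eq.1 ht with h | h
      · exact h
      · exact absurd (by simp [h] : t ∈ (i :: (popLoopA prices (prices.getD i 0) i st.1 st.2).2)) hts
    exact h5 t hti (fun hr => hts (List.mem_cons_of_mem _ hr))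

lemma foldA_inv (prices : List Int) (i : Nat) (hi : i ≤ prices.length) :
    InvA prices i ((List.range i).foldl (stepA prices) (List.replicate prices.length 0, [])) := by
  induction i with
  | zero =>
    refine ⟨by simp, by simp, by simp, by simp, ?_⟩
    intro t ht; omega
  | succ k ih =>
    rw [List.range_succ, List.foldl_append]
    exact stepA_inv prices k _ (by omega) (ih (by omega))

lemma drainA_spec (prices : List Int) (ans : List Int) (s : List Nat)
    (hlen : ans.length = prices.length)
    (hb : ∀ t ∈ s, t < prices.length)
    (hnodup : s.Nodup)
    (hnd : ∀ t ∈ s, NoDrop prices t prices.length)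
    (hans : ∀ t, t < prices.length → t ∉ s → ans.getD t 0 = countB prices t) :
    (drainA prices.length ans s).length = prices.length ∧
    (∀ t, t < prices.length → (drainA prices.length ans s).getD t 0 = countB prices t) := by
  induction s generalizing ans with
  | nil =>
    exact ⟨hlen, fun t ht => hans t ht (by simp)⟩
  | cons t0 rest ih =>
    have ht0 : t0 < prices.length := hb t0 (by simp)
    have hstep : drainA prices.length ans (t0 :: rest) =
        drainA prices.length (ans.set t0 ((prices.length : Int) - 1 - t0)) rest := by
      simp [drainA]
    rw [hstep]
    apply ih
    · simp [hlen]
    · exact fun t ht => hb t (by simp [ht])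
    · exact (List.nodup_cons.1 hnodup).2
    · exact fun t ht => hnd t (by simp [ht])
    · intro u hu hur
      by_cases he : u = t0
      · subst he
        rw [getD_set_self _ _ _ (by omega),
          countB_no_drop prices u hu (hnd u (by simp))]
      · rw [getD_set_ne _ _ _ _ (Ne.symm he)]
        exact hans u hu (by simp [hur, he])

-- ===== VERDICT (by name: the statement is the Claim_ definition above) =====
theorem solution_spec : Claim_equal_solution := by
  intro prices _
  unfold Spec_solution
  obtain ⟨hlen, hb, hpw, hnd, hans⟩ := foldA_inv prices prices.length (Nat.le_refl _)
  have hnodup : ((List.range prices.length).foldl (stepA prices)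
      (List.replicate prices.length 0, ([] : List Nat))).2.Nodup := by
    refine List.Pairwise.imp ?_ hpw
    intro a b hab
    have := hab.1; omega
  obtain ⟨hdlen, hdval⟩ := drainA_spec prices _ _ hlen hb hnodup hnd hans
  have hsol : solution prices = drainA prices.length
      ((List.range prices.length).foldl (stepA prices) (List.replicate prices.length 0, [])).1
      ((List.range prices.length).foldl (stepA prices) (List.replicate prices.length 0, [])).2 := rfl
  have halt : solution_alt prices = (List.range prices.length).map (countB prices) := rfl
  rw [hsol, halt]
  apply List.ext_getElem
  · rw [hdlen]; simp
  · intro t h1 h2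
    have ht : t < prices.length := by simpa using h2
    have hv := hdval t ht
    rw [List.getElem_map, List.getElem_range, ← hv]
    simp [List.getD, List.getElem?_eq_getElem h1]
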